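-- pv_equiv track=rewrite | github.com/ramanujansrinath/grid-search-strategies | strategies/strategy_hilbert_curve.py | _d2xy
-- ===== SOURCE A (Python) =====
-- from typing import List, Tuple
--
-- def _d2xy(n: int, d: int) -> Tuple[int, int]:
--     """
--     Convert Hilbert distance *d* to (x, y) coordinates in an n×n grid
--     (n must be a power of 2).  x = col, y = row.
--     Reference: Wikipedia "Hilbert curve" pseudocode.
--     """
--     x = y = 0
--     s = 1
--     while s < n:
--         rx = 1 if (d & 2) else 0
--         ry = 1 if ((d & 1) ^ rx) else 0
--         if ry == 0:
--             if rx == 1: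
--                 x = s - 1 - x
--                 y = s - 1 - y
--             x, y = y, x
--         x += s * rx
--         y += s * ry
--         d >>= 2
--         s <<= 1
--     return x, y
-- ===== SOURCE B (Python) =====
-- def _d2xy(n, d):
--     # Top-down finite-orientation machine: read 2-bit quadrants of d from the
--     # highest level down, composing affine maps; answer is the final offset.
--     L = (n - 1).bit_length() if n > 1 else 0
--     X = Y = 0
--     b11, b12, b21, b22 = 1, 0, 0, 1
--     for i in reversed(range(L)):
--         s = 1 << i
--         q = (d >> (2 * i)) & 3
--         if q == 0:
--             c11, c12, c21, c22, cx, cy = 0, 1, 1, 0, 0, 0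
--         elif q == 1:
--             c11, c12, c21, c22, cx, cy = 1, 0, 0, 1, 0, s
--         elif q == 2:
--             c11, c12, c21, c22, cx, cy = 1, 0, 0, 1, s, s
--         else:
--             c11, c12, c21, c22, cx, cy = 0, -1, -1, 0, 2 * s - 1, s - 1
--         X, Y = X + b11 * cx + b12 * cy, Y + b21 * cx + b22 * cy
--         b11, b12, b21, b22 = (b11 * c11 + b12 * c21, b11 * c12 + b12 * c22,
--                               b21 * c11 + b22 * c21, b21 * c12 + b22 * c22)
--     return X, Y
-- ===== Notes on version B (the rewrite author's own statement) =====
-- stated objective: alternative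
-- what changed: Replaces A's bottom-up loop that repeatedly rotates/reflects the accumulated coordinates at each scale by a top-down pass that reads the 2-bit quadrant digits of d from the highest level down, composing a small affine orientation state (2x2 sign/swap matrix plus offset) and returning the final offset; the level count comes from (n-1).bit_length() instead of a doubling loop.
import Mathlib
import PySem

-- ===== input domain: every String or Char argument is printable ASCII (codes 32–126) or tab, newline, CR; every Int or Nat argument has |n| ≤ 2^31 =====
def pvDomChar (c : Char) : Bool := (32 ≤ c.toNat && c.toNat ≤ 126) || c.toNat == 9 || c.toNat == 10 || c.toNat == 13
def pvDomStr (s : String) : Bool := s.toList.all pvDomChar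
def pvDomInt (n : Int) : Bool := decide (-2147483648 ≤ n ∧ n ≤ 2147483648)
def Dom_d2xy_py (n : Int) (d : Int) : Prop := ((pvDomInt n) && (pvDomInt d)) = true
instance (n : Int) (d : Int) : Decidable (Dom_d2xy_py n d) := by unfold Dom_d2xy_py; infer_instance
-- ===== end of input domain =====

-- B replaces A's bottom-up rotate-and-translate loop by a top-down affine-composition
-- machine over the 2-bit quadrant digits of d (objective: alternative, same cost).

-- ===== PORT A =====
-- body of one iteration of A's while-loop (rx/ry extraction, conditional
-- reflect+swap, then translate), acting on the pair p = (x, y)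
def pvStepA (s d : Int) (p : Int × Int) : Int × Int :=
  let rx : Int := if PySem.Int.band d 2 ≠ 0 then 1 else 0          -- 1 if (d & 2) else 0
  let ry : Int := if PySem.Int.bxor (PySem.Int.band d 1) rx ≠ 0 then 1 else 0
  -- if ry == 0: (if rx == 1: reflect both) then swap
  let xy := if ry = 0 then (if rx = 1 then (s - 1 - p.2, s - 1 - p.1) else (p.2, p.1)) else p
  (xy.1 + s * rx, xy.2 + s * ry)                                    -- x += s*rx; y += s*ry

-- A's while-loop; s starts at 1 and doubles, so 1 ≤ s is invariant (carried for termination)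
def d2xy_pyLoop (n s d : Int) (p : Int × Int) (hs : 1 ≤ s) : Int × Int :=
  if _h : s < n then
    d2xy_pyLoop n (2 * s) (d >>> (2 : Nat)) (pvStepA s d p) (by omega)  -- d >>= 2; s <<= 1 (= 2*s)
  else p
termination_by (n - s).toNat
decreasing_by omega

def d2xy_py (n : Int) (d : Int) : Int × Int := d2xy_pyLoop n 1 d (0, 0) (by omega)

-- ===== PORT B =====
-- one step of B's loop: state (X, Y, b11, b12, b21, b22), level i
def pvBStep (d : Int) (st : Int × Int × Int × Int × Int × Int) (i : Nat) :
    Int × Int × Int × Int × Int × Int :=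
  let s : Int := (1 : Int) <<< i                                    -- s = 1 << i
  let q : Int := PySem.Int.band (d >>> (2 * i)) 3                   -- q = (d >> (2*i)) & 3
  let c : Int × Int × Int × Int × Int × Int :=
    if q = 0 then (0, 1, 1, 0, 0, 0)
    else if q = 1 then (1, 0, 0, 1, 0, s)
    else if q = 2 then (1, 0, 0, 1, s, s)
    else (0, -1, -1, 0, 2 * s - 1, s - 1)
  match st, c with
  | (X, Y, b11, b12, b21, b22), (c11, c12, c21, c22, cx, cy) =>
    (X + b11 * cx + b12 * cy, Y + b21 * cx + b22 * cy,
     b11 * c11 + b12 * c21, b11 * c12 + b12 * c22,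
     b21 * c11 + b22 * c21, b21 * c12 + b22 * c22)

def d2xy_py_alt (n : Int) (d : Int) : Int × Int :=
  let L : Nat := if 1 < n then PySem.Int.bitLength (n - 1) else 0   -- (n-1).bit_length() if n > 1 else 0
  let r := ((List.range L).reverse).foldl (pvBStep d) (0, 0, 1, 0, 0, 1)
  (r.1, r.2.1)

-- ===== PRECONDITION & SPEC =====
def Spec_d2xy_py (n : Int) (d : Int) (out : Int × Int) : Prop := out = d2xy_py_alt n d
instance (n : Int) (d : Int) (out : Int × Int) : Decidable (Spec_d2xy_py n d out) := by unfold Spec_d2xy_py; infer_instance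

-- ===== CLAIM (what is proved, stated in full; the proofs are below) =====
def Claim_equal_d2xy_py : Prop := ∀ (n : Int) (d : Int), Dom_d2xy_py n d → Spec_d2xy_py n d (d2xy_py n d)

-- ===== LEMMAS AND PROOFS =====

-- the level count both programs use
def pvL (n : Int) : Nat := if 1 < n then PySem.Int.bitLength (n - 1) else 0

-- pure iteration of A's body over L levels with scale s doubling
def pvAIter : Nat → Int → Int → Int × Int → Int × Int
  | 0, _, _, p => p
  | L + 1, s, d, p => pvAIter L (2 * s) (d >>> (2 : Nat)) (pvStepA s d p)

-- B's state as an affine map applied to a point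
def pvApply (st : Int × Int × Int × Int × Int × Int) (p : Int × Int) : Int × Int :=
  (st.1 + st.2.2.1 * p.1 + st.2.2.2.1 * p.2,
   st.2.1 + st.2.2.2.2.1 * p.1 + st.2.2.2.2.2 * p.2)

def pvPt (st : Int × Int × Int × Int × Int × Int) : Int × Int := (st.1, st.2.1)

def pvB (d : Int) (L : Nat) : Int × Int :=
  pvPt (((List.range L).reverse).foldl (pvBStep d) (0, 0, 1, 0, 0, 1))

-- Nat low-bit facts
theorem pvLand3 (m : Nat) : m &&& 3 = m % 4 := by
  have := Nat.and_two_pow_sub_one_eq_mod m 2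
  norm_num at this; omega

theorem pvLand1 (m : Nat) : m &&& 1 = m % 2 := Nat.and_one_is_mod m

theorem pvLand2 (m : Nat) : m &&& 2 = m % 4 - m % 2 := by
  have h32 : (3 &&& 2 : Nat) = 2 := by decide
  have e1 : m &&& 2 = m &&& (3 &&& 2) := by rw [h32]
  have e2 : m &&& (3 &&& 2) = (m &&& 3) &&& 2 := (Nat.land_assoc m 3 2).symm
  rw [e1, e2, pvLand3]
  have h2 : m % 2 = m % 4 % 2 := (Nat.mod_mod_of_dvd m (by norm_num)).symm
  rw [h2]
  have : m % 4 = 0 ∨ m % 4 = 1 ∨ m % 4 = 2 ∨ m % 4 = 3 := by omega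
  rcases this with h | h | h | h <;> rw [h] <;> decide

-- PySem.Int.band with a Nat literal, by sign of a
theorem pvBandPos (a : Int) (b : Nat) (h : 0 ≤ a) :
    PySem.Int.band a b = ((a.toNat &&& b : Nat) : Int) := by
  unfold PySem.Int.band
  rw [if_pos h, if_pos (by positivity : (0:Int) ≤ (b:Int))]
  norm_num

theorem pvBandNeg (a : Int) (b : Nat) (h : ¬ 0 ≤ a) :
    PySem.Int.band a b = ((b - (b &&& (-a - 1).toNat) : Nat) : Int) := by
  unfold PySem.Int.band
  rw [if_neg h, if_pos (by positivity : (0:Int) ≤ (b:Int))]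
  norm_num

-- the two low bits of an Int, read off from band · 3
theorem pvBits (a : Int) :
    (PySem.Int.band a 3 = 0 ∧ PySem.Int.band a 1 = 0 ∧ PySem.Int.band a 2 = 0) ∨
    (PySem.Int.band a 3 = 1 ∧ PySem.Int.band a 1 = 1 ∧ PySem.Int.band a 2 = 0) ∨
    (PySem.Int.band a 3 = 2 ∧ PySem.Int.band a 1 = 0 ∧ PySem.Int.band a 2 = 2) ∨
    (PySem.Int.band a 3 = 3 ∧ PySem.Int.band a 1 = 1 ∧ PySem.Int.band a 2 = 2) := by
  have e3 : ((3:Int)) = ((3:Nat) : Int) := by norm_num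
  have e1 : ((1:Int)) = ((1:Nat) : Int) := by norm_num
  have e2 : ((2:Int)) = ((2:Nat) : Int) := by norm_num
  by_cases h : 0 ≤ a
  · rw [e3, e1, e2, pvBandPos a 3 h, pvBandPos a 1 h, pvBandPos a 2 h,
      pvLand3, pvLand1, pvLand2]
    omega
  · rw [e3, e1, e2, pvBandNeg a 3 h, pvBandNeg a 1 h, pvBandNeg a 2 h,
      Nat.land_comm 3, Nat.land_comm 1, Nat.land_comm 2, pvLand3, pvLand1, pvLand2]
    omega

theorem pvOneShift (i : Nat) : ((1 : Int) <<< i) = 2 ^ i := by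
  induction i with
  | zero => rfl
  | succ k ih =>
      have : ((1 : Int) <<< (k + 1)) = ((1 : Int) <<< k) * 2 := by
        rw [Int.shiftLeft_eq, Int.shiftLeft_eq]; ring
      rw [this, ih]; ring

-- A's body at scale 2^L on the bits d >> 2L equals applying B's one-level affine map
theorem pvStep_eq (d : Int) (L : Nat) (p : Int × Int) :
    pvStepA ((2 : Int) ^ L) (d >>> (2 * L)) p =
      pvApply (pvBStep d (0, 0, 1, 0, 0, 1) L) p := by
  obtain ⟨px, py⟩ := p
  have hx00 : PySem.Int.bxor 0 0 = 0 := by decide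
  have hx10 : PySem.Int.bxor 1 0 = 1 := by decide
  have hx01 : PySem.Int.bxor 0 1 = 1 := by decide
  have hx11 : PySem.Int.bxor 1 1 = 0 := by decide
  have hsh : ((1 : Int) <<< L) = 2 ^ L := pvOneShift L
  rcases pvBits (d >>> (2 * L)) with ⟨h3, h1, h2⟩ | ⟨h3, h1, h2⟩ | ⟨h3, h1, h2⟩ | ⟨h3, h1, h2⟩ <;>
    simp only [pvStepA, pvBStep, pvApply, hsh, h3, h1, h2] <;>
    norm_num [Prod.mk.injEq, hx00, hx10, hx01, hx11] <;> omega

-- shift-composition and trivial-shift facts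
theorem pvShiftZero (d : Int) : d >>> (0 : Nat) = d := by cases d <;> rfl

theorem pvShiftShift (d : Int) (k : Nat) :
    (d >>> (2 : Nat)) >>> (2 * k) = d >>> (2 * (k + 1)) := by
  rw [show 2 * (k + 1) = 2 + 2 * k from by omega]
  exact (Int.shiftRight_add d 2 (2 * k)).symm

-- peel the LAST (topmost) iteration off pvAIter
theorem pvAIter_last : ∀ (L : Nat) (s d : Int) (p : Int × Int),
    pvAIter (L + 1) s d p =
      pvStepA ((2 : Int) ^ L * s) (d >>> (2 * L)) (pvAIter L s d p) := by
  intro L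
  induction L with
  | zero =>
      intro s d p
      show pvStepA s d p = pvStepA ((2:Int) ^ 0 * s) (d >>> (2 * 0 : Nat)) (pvAIter 0 s d p)
      rw [pow_zero, one_mul, show (2 * 0 : Nat) = 0 from rfl, pvShiftZero]
      rfl
  | succ k ih =>
      intro s d p
      have step : pvAIter (k + 1 + 1) s d p
          = pvAIter (k + 1) (2 * s) (d >>> (2 : Nat)) (pvStepA s d p) := rfl
      rw [step, ih]
      rw [pvShiftShift]
      congr 1
      ring

-- composing B's step with an arbitrary accumulated affine state
theorem pvComp (d : Int) (i : Nat) (st : Int × Int × Int × Int × Int × Int) (p : Int × Int) :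
    pvApply (pvBStep d st i) p =
      pvApply st (pvApply (pvBStep d (0, 0, 1, 0, 0, 1) i) p) := by
  obtain ⟨X, Y, b11, b12, b21, b22⟩ := st
  obtain ⟨px, py⟩ := p
  simp only [pvBStep, pvApply]
  split_ifs <;> simp <;> constructor <;> ring

-- the point of the fold from any state is the state applied to the fold from identity
theorem pvFold_pt (d : Int) (l : List Nat) :
    ∀ st, pvPt (l.foldl (pvBStep d) st) =
      pvApply st (pvPt (l.foldl (pvBStep d) (0, 0, 1, 0, 0, 1))) := by
  induction l with
  | nil =>
      intro st; obtain ⟨X, Y, b11, b12, b21, b22⟩ := st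
      simp only [List.foldl_nil, pvPt, pvApply]
      refine Prod.ext ?_ ?_ <;> dsimp only <;> ring
  | cons i l ih =>
      intro st
      calc pvPt ((i :: l).foldl (pvBStep d) st)
          = pvPt (l.foldl (pvBStep d) (pvBStep d st i)) := rfl
        _ = pvApply (pvBStep d st i) (pvPt (l.foldl (pvBStep d) (0,0,1,0,0,1))) := ih _
        _ = pvApply st (pvApply (pvBStep d (0,0,1,0,0,1) i)
              (pvPt (l.foldl (pvBStep d) (0,0,1,0,0,1)))) := pvComp _ _ _ _
        _ = pvApply st (pvPt ((i :: l).foldl (pvBStep d) (0,0,1,0,0,1))) := by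
            rw [show ((i :: l).foldl (pvBStep d) (0,0,1,0,0,1))
                  = l.foldl (pvBStep d) (pvBStep d (0,0,1,0,0,1) i) from rfl,
              ih (pvBStep d (0,0,1,0,0,1) i)]

theorem pvB_succ (d : Int) (L : Nat) :
    pvB d (L + 1) = pvApply (pvBStep d (0, 0, 1, 0, 0, 1) L) (pvB d L) := by
  unfold pvB
  rw [List.range_succ, List.reverse_append]
  simp only [List.reverse_singleton, List.singleton_append, List.foldl_cons]
  exact pvFold_pt d _ _

-- bottom-up iteration of A's body = B's top-down affine machine
theorem pvMain (L : Nat) (d : Int) : pvAIter L 1 d (0, 0) = pvB d L := by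
  induction L with
  | zero => rfl
  | succ k ih =>
      rw [pvAIter_last, pvB_succ, ← ih, mul_one]
      exact pvStep_eq d k _

-- the while-guard in terms of the level count
theorem pvGuard (n : Int) (k : Nat) : (2 : Int) ^ k < n ↔ k < pvL n := by
  unfold pvL
  by_cases h : 1 < n
  · rw [if_pos h]
    set L := PySem.Int.bitLength (n - 1) with hL
    have h1 : (n - 1).natAbs < 2 ^ L := PySem.Int.lt_two_pow_bitLength (n - 1)
    have h2 : 2 ^ (L - 1) ≤ (n - 1).natAbs := PySem.Int.two_pow_bitLength_le (n - 1) (by omega)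
    have habs : ((n - 1).natAbs : Int) = n - 1 := Int.natAbs_of_nonneg (by omega)
    have h1' : n - 1 < (2 : Int) ^ L := by
      rw [← habs]; exact_mod_cast h1
    have h2' : (2 : Int) ^ (L - 1) ≤ n - 1 := by
      rw [← habs]; exact_mod_cast h2
    constructor
    · intro hk
      by_contra hc
      rw [not_lt] at hc
      have : (2 : Int) ^ L ≤ 2 ^ k := pow_le_pow_right₀ (by norm_num) hc
      omega
    · intro hk
      have hL1 : 1 ≤ L := by omega
      have : (2 : Int) ^ k ≤ 2 ^ (L - 1) := pow_le_pow_right₀ (by norm_num) (by omega)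
      omega
  · rw [if_neg h]
    have : (0 : Int) < 2 ^ k := pow_pos (by norm_num) k
    constructor
    · intro hk; omega
    · intro hk; omega

-- the loop, started at scale s = 2^k, runs exactly pvL n - k iterations of pvAIter
theorem pvLoop_iter (n : Int) : ∀ (j k : Nat) (s d : Int) (p : Int × Int) (hs : 1 ≤ s),
    s = (2 : Int) ^ k → pvL n - k = j → d2xy_pyLoop n s d p hs = pvAIter j s d p := by
  intro j
  induction j with
  | zero =>
      intro k s d p hs hsk hj
      have hng : ¬ s < n := by
        rw [hsk]
        intro hc
        have := (pvGuard n k).mp hc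
        omega
      rw [d2xy_pyLoop, dif_neg hng]
      rfl
  | succ j ih =>
      intro k s d p hs hsk hj
      have hg : s < n := by
        rw [hsk]
        exact (pvGuard n k).mpr (by omega)
      rw [d2xy_pyLoop, dif_pos hg]
      have : pvAIter (j + 1) s d p = pvAIter j (2 * s) (d >>> (2 : Nat)) (pvStepA s d p) := rfl
      rw [this]
      exact ih (k + 1) (2 * s) (d >>> (2 : Nat)) (pvStepA s d p) (by omega)
        (by rw [hsk]; ring) (by omega)

theorem pvEq (n d : Int) : d2xy_py n d = d2xy_py_alt n d := by
  have h1 : d2xy_py n d = pvAIter (pvL n) 1 d (0, 0) :=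
    pvLoop_iter n (pvL n) 0 1 d (0, 0) (by omega) (by norm_num) (by omega)
  have h2 : d2xy_py_alt n d = pvB d (pvL n) := by
    simp only [d2xy_py_alt, pvB, pvPt, pvL]
  rw [h1, h2, pvMain]

-- ===== VERDICT (by name: the statement is the Claim_ definition above) =====
theorem d2xy_py_spec : Claim_equal_d2xy_py := by
  intro n d _
  unfold Spec_d2xy_py
  exact pvEq n d
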